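-- pv_equiv track=rewrite | github.com/fabertocchi/clique-community-persistence | utils.py | glyph
-- ===== SOURCE A (Python) =====
-- import math
--
-- def persistenceIndicator(diagram, epsilon):
--     """ computes number of active connected components for given threshold epsilon """
--
--     n = 0
--     for comp in diagram:
--         birth = comp[1][0]
--         death = comp[1][1]
--         if epsilon >= birth and epsilon < death:
--             n += 1
--
--     return n
--
-- def glyph(diag, divider, length):
--     """ condensed glyph that gives a summary of clique community activity """
--
--     steps = length // divider   # discretize the domain into uniformly spaced bins
--     values = []
--     for step in range(steps):
--         value = -math.inf
--         for epsilon in range(step * divider, step * divider + divider+1):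
--             value = max(value, persistenceIndicator(diag, epsilon)) # maximum value of persistence indicator in that range
--         values.append(value)
--
--     return values
-- ===== SOURCE B (Python) =====
-- def glyph(diag, divider, length):
--     """ condensed glyph that gives a summary of clique community activity """
--     steps = length // divider
--     if steps <= 0:
--         return []
--     M = steps * divider            # largest epsilon any bin looks at
--     # difference map: +1 where a component becomes active, -1 just past its last active epsilon
--     diff = {}
--     for comp in diag:
--         lo = max(comp[1][0], 0)
--         hi = min(comp[1][1] - 1, M)
--         if lo <= hi:
--             diff[lo] = diff.get(lo, 0) + 1
--             diff[hi + 1] = diff.get(hi + 1, 0) - 1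
--     # prefix sums: counts[e] = number of active components at epsilon e
--     counts = []
--     c = 0
--     for e in range(M + 1):
--         c += diff.get(e, 0)
--         counts.append(c)
--     # per-bin maximum over the d+1 epsilons the bin covers
--     return [max(counts[s * divider : s * divider + divider + 1]) for s in range(steps)]
-- ===== Notes on version B (the rewrite author's own statement) =====
-- stated objective: faster
-- what changed: replaces A's per-epsilon rescan of the whole diagram with a difference map + prefix sums computed once over the epsilon axis, then per-bin maxima
-- outside the precondition, e.g. on glyph([], -1, -1): A returns [-inf], B raises ValueError; on glyph([(0, (0, 2))], -2, -5): A returns [-inf, -inf], B raises ValueError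
import Mathlib
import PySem

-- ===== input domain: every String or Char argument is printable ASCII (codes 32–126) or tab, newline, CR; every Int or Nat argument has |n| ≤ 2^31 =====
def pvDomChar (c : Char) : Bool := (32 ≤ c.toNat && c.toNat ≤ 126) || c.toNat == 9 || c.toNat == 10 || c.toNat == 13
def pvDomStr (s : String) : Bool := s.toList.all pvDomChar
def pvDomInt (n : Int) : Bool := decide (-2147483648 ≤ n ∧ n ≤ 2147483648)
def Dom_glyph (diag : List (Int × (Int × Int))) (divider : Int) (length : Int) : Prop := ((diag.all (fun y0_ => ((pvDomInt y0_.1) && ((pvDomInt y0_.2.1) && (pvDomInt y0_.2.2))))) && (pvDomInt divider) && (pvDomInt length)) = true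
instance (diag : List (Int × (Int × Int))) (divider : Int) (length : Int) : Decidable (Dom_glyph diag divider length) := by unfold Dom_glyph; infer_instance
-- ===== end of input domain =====

-- B replaces A's per-epsilon rescan of the whole diagram by a difference map + prefix sums
-- (one pass over the diagram, one pass over the epsilon axis), then per-bin maxima.

-- ===== PORT A =====
-- persistenceIndicator
def pvPI (diagram : List (Int × (Int × Int))) (epsilon : Int) : Int :=
  diagram.foldl (fun n comp =>
    if epsilon ≥ comp.2.1 ∧ epsilon < comp.2.2 then n + 1 else n) 0

def glyph (diag : List (Int × (Int × Int))) (divider : Int) (length : Int) : List Int :=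
  let steps := PySem.Int.floordiv length divider
  (PySem.List.pyRange 0 steps).foldl
    (fun values step =>
      let value : Option Int :=   -- 'none' models the initial -math.inf (an Int never compares below it)
        (PySem.List.pyRange (step * divider) (step * divider + divider + 1)).foldl
          (fun value epsilon =>
            some (match value with
                  | none => pvPI diag epsilon
                  | some v => max v (pvPI diag epsilon))) none
      -- value = none only when the inner range is empty (divider ≤ -1), where A returns float -inf,
      -- not an Int: excluded by Pre_, so the default 0 is never consulted on Pre_.
      values ++ [value.getD 0]) []

-- ===== PORT B =====
def glyph_alt (diag : List (Int × (Int × Int))) (divider : Int) (length : Int) : List Int :=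
  let steps := PySem.Int.floordiv length divider
  if steps ≤ 0 then []
  else
    let M := steps * divider
    let diff : PySem.Dict Int Int := diag.foldl
      (fun diff comp =>
        let lo := max comp.2.1 0
        let hi := min (comp.2.2 - 1) M
        if lo ≤ hi then
          (diff.insert lo (diff.getD lo 0 + 1)).insert (hi + 1)
            ((diff.insert lo (diff.getD lo 0 + 1)).getD (hi + 1) 0 - 1)
        else diff) PySem.Dict.empty
    let counts := ((PySem.List.pyRange 0 (M + 1)).foldl
      (fun (st : Int × List Int) e => (st.1 + diff.getD e 0, st.2 ++ [st.1 + diff.getD e 0]))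
      (0, ([] : List Int))).2
    (PySem.List.pyRange 0 steps).map (fun s =>
      -- Python's max raises on an empty slice; under Pre_ (divider ≥ 1 here) every slice
      -- is nonempty, so the default 0 is never consulted on Pre_.
      (PySem.List.max? (PySem.List.slice counts (some (s * divider)) (some (s * divider + divider + 1)))
        (fun x => x)).getD 0)

-- ===== PRECONDITION & SPEC =====
-- Pre_ excludes divider = 0, where A raises ZeroDivisionError, and divider < 0 with length < 0,
-- where A returns a list of float -inf values (not ints, outside the declared return type).
def Pre_glyph (diag : List (Int × (Int × Int))) (divider : Int) (length : Int) : Prop :=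
  1 ≤ divider ∨ (divider ≤ -1 ∧ 0 ≤ length)
instance (diag : List (Int × (Int × Int))) (divider : Int) (length : Int) : Decidable (Pre_glyph diag divider length) := by unfold Pre_glyph; infer_instance

def pvWitness_glyph : (List (Int × (Int × Int))) × Int × Int := ([(0, (1, 4)), (1, (0, 2))], 2, 6)

def Spec_glyph (diag : List (Int × (Int × Int))) (divider : Int) (length : Int) (out : List Int) : Prop := out = glyph_alt diag divider length
instance (diag : List (Int × (Int × Int))) (divider : Int) (length : Int) (out : List Int) : Decidable (Spec_glyph diag divider length out) := by unfold Spec_glyph; infer_instance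

-- ===== CLAIM (what is proved, stated in full; the proofs are below) =====
def Claim_equal_glyph : Prop := ∀ (diag : List (Int × (Int × Int))) (divider : Int) (length : Int), Dom_glyph diag divider length → Pre_glyph diag divider length → Spec_glyph diag divider length (glyph diag divider length)

-- ===== LEMMAS AND PROOFS =====

-- the A-side inner running max, once it has left -inf
lemma foldl_optmax (diag : List (Int × (Int × Int))) (t : List Int) (v : Int) :
    t.foldl (fun value epsilon =>
      some (match value with
            | none => pvPI diag epsilon
            | some w => max w (pvPI diag epsilon))) (some v)
    = some (t.foldl (fun w e => max w (pvPI diag e)) v) := by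
  induction t generalizing v with
  | nil => rfl
  | cons e t ih => simp [List.foldl_cons, ih]

-- pvPI counts the active components
lemma pvPI_eq_countP (diag : List (Int × (Int × Int))) (e : Int) :
    pvPI diag e = (diag.countP (fun comp => decide (e ≥ comp.2.1 ∧ e < comp.2.2)) : Int) := by
  unfold pvPI
  have h := PySem.List.foldl_ite_add_one (fun comp : Int × (Int × Int) => e ≥ comp.2.1 ∧ e < comp.2.2) diag 0
  simpa using h

-- the scan loop of B: running value and emitted list
def runSums (g : Int → Int) : List Int → Int → List Int
  | [], _ => []
  | e :: t, c => (c + g e) :: runSums g t (c + g e)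

lemma foldl_scan (g : Int → Int) (l : List Int) (c : Int) (acc : List Int) :
    l.foldl (fun (st : Int × List Int) e => (st.1 + g e, st.2 ++ [st.1 + g e])) (c, acc)
    = (c + (l.map g).sum, acc ++ runSums g l c) := by
  induction l generalizing c acc with
  | nil => simp [runSums]
  | cons e t ih => simp [List.foldl_cons, runSums, ih]; ring

-- the scan over range(a, b), seeded with the prefix sum below a, emits the prefix sums
lemma runSums_pyRange (g : Int → Int) (a b c0 : Int) (ha : 0 ≤ a)
    (hc : c0 = ((PySem.List.pyRange 0 a).map g).sum) :
    runSums g (PySem.List.pyRange a b) c0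
    = (PySem.List.pyRange a b).map (fun e => ((PySem.List.pyRange 0 (e + 1)).map g).sum) := by
  by_cases h : b ≤ a
  · rw [PySem.List.pyRange_one_eq_nil h]; rfl
  · rw [PySem.List.pyRange_one_cons (by omega : a < b)]
    have hstep : c0 + g a = ((PySem.List.pyRange 0 (a + 1)).map g).sum := by
      rw [PySem.List.pyRange_one_succ_right ha, hc]; simp
    have ih := runSums_pyRange g (a + 1) b (c0 + g a) (by omega) hstep
    simp only [runSums, List.map_cons]
    rw [ih, hstep]
termination_by (b - a).toNat
decreasing_by omega

-- shifting one key of a summed-over function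
lemma sum_map_update (l : List Int) (hnd : l.Nodup) (f : Int → Int) (k c : Int) :
    (l.map (fun i => if i = k then f k + c else f i)).sum
    = (l.map f).sum + (if k ∈ l then c else 0) := by
  induction l with
  | nil => simp
  | cons x t ih =>
    simp only [List.nodup_cons] at hnd
    by_cases hx : x = k
    · subst hx
      have hmap : t.map (fun i => if i = x then f x + c else f i) = t.map f :=
        List.map_congr_left (fun i hi => by
          have hne : i ≠ x := fun h => hnd.1 (h ▸ hi)
          simp [hne])
      simp [hmap]
      ring
    · have hiff : (k ∈ x :: t) ↔ k ∈ t := by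
        rw [List.mem_cons]
        exact or_iff_right (fun h => hx h.symm)
      simp only [List.map_cons, List.sum_cons, if_neg hx, ih hnd.2]
      rw [if_congr hiff rfl rfl]
      ring

-- effect of one dict insert on the prefix sum of getD over range(0, e+1)
lemma sum_insert_shift (d : PySem.Dict Int Int) (k v e : Int) :
    ((PySem.List.pyRange 0 (e + 1)).map (fun i => (d.insert k v).getD i 0)).sum
    = ((PySem.List.pyRange 0 (e + 1)).map (fun i => d.getD i 0)).sum
      + (if 0 ≤ k ∧ k < e + 1 then v - d.getD k 0 else 0) := by
  have h1 : ((PySem.List.pyRange 0 (e + 1)).map (fun i => (d.insert k v).getD i 0))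
      = ((PySem.List.pyRange 0 (e + 1)).map (fun i => if i = k then d.getD k 0 + (v - d.getD k 0) else d.getD i 0)) := by
    apply List.map_congr_left
    intro i _
    rw [PySem.Dict.getD_insert]
    split_ifs with h
    · ring
    · rfl
  rw [h1, sum_map_update _ (PySem.List.nodup_pyRange_one 0 (e + 1)) (fun i => d.getD i 0) k (v - d.getD k 0)]
  congr 1
  simp [PySem.List.mem_pyRange_one]

-- the difference map built from diag has, as prefix sum at e (0 ≤ e ≤ M), the active count at e
lemma diff_sum (M e : Int) (he : 0 ≤ e) (heM : e ≤ M) (diag : List (Int × (Int × Int))) :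
    ∀ d : PySem.Dict Int Int,
    ((PySem.List.pyRange 0 (e + 1)).map (fun i =>
        (diag.foldl (fun diff comp =>
          let lo := max comp.2.1 0
          let hi := min (comp.2.2 - 1) M
          if lo ≤ hi then
            (diff.insert lo (diff.getD lo 0 + 1)).insert (hi + 1)
              ((diff.insert lo (diff.getD lo 0 + 1)).getD (hi + 1) 0 - 1)
          else diff) d).getD i 0)).sum
    = ((PySem.List.pyRange 0 (e + 1)).map (fun i => d.getD i 0)).sum
      + (diag.countP (fun comp => decide (e ≥ comp.2.1 ∧ e < comp.2.2)) : Int) := by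
  induction diag with
  | nil => intro d; simp
  | cons comp rest ih =>
    intro d
    rw [List.foldl_cons, List.countP_cons]
    simp only []
    rw [ih]
    by_cases hcase : max comp.2.1 0 ≤ min (comp.2.2 - 1) M
    · rw [if_pos hcase, sum_insert_shift, sum_insert_shift]
      by_cases hmem : e ≥ comp.2.1 ∧ e < comp.2.2
      · have hd' : decide (e ≥ comp.2.1 ∧ e < comp.2.2) = true := by simpa using hmem
        simp only [hd', if_true]
        split_ifs <;> push_cast <;> omega
      · have hd' : decide (e ≥ comp.2.1 ∧ e < comp.2.2) = false := by
          simpa using hmem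
        simp only [hd', Bool.false_eq_true, if_false]
        rw [not_and_or, not_lt] at hmem
        split_ifs <;> push_cast <;> omega
    · rw [if_neg hcase]
      have : decide (e ≥ comp.2.1 ∧ e < comp.2.2) = false := by
        simp only [decide_eq_false_iff_not, not_and, not_lt]
        intro hb
        omega
      simp [this]

-- slicing a map over range(0, n) is the map over the sub-range
lemma slice_map_pyRange (F : Int → Int) (a b n : Int) (h0 : 0 ≤ a) (hab : a ≤ b) (hbn : b ≤ n) :
    PySem.List.slice ((PySem.List.pyRange 0 n).map F) (some a) (some b)
    = (PySem.List.pyRange a b).map F := by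
  have hlen : (((PySem.List.pyRange 0 n).map F).length : Int) = n := by
    simp [PySem.List.length_pyRange_one]; omega
  have hla : ((PySem.List.pyRange 0 a).map F).length = a.toNat := by
    simp [PySem.List.length_pyRange_one]
  have hlb : ((PySem.List.pyRange a b).map F).length = b.toNat - a.toNat := by
    simp [PySem.List.length_pyRange_one]; omega
  rw [PySem.List.slice_of_nonneg _ h0 (by omega) (by omega) (by omega)]
  rw [PySem.List.pyRange_one_append 0 a n h0 (by omega), PySem.List.pyRange_one_append a b n hab hbn,
    List.map_append, List.map_append]
  rw [List.drop_append_of_le_length (by omega), List.drop_eq_nil_of_le (by omega), List.nil_append]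
  rw [List.take_append_of_le_length (by omega)]
  exact List.take_of_length_le (by omega)

-- under Pre_ with a positive number of steps, the divider is positive
lemma pre_pos_divider (divider length : Int)
    (hpre : 1 ≤ divider ∨ (divider ≤ -1 ∧ 0 ≤ length))
    (hs : ¬ PySem.Int.floordiv length divider ≤ 0) : 1 ≤ divider := by
  rcases hpre with h | ⟨hd, hl⟩
  · exact h
  · exfalso
    have hmul := PySem.Int.floordiv_mul_add_mod length divider
    have hmod := PySem.Int.mod_neg_bounds length (show divider < 0 by omega)
    nlinarith [hmul, hmod.1, hmod.2]

-- ===== VERDICT (by name: the statement is the Claim_ definition above) =====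
theorem glyph_spec : Claim_equal_glyph := by
  intro diag divider length _hdom hpre
  unfold Spec_glyph
  by_cases hs : PySem.Int.floordiv length divider ≤ 0
  · simp only [glyph, glyph_alt, if_pos hs, PySem.List.pyRange_one_eq_nil hs, List.foldl_nil]
  · have hd : 1 ≤ divider := pre_pos_divider divider length hpre hs
    -- unfold both ports first, then abstract the shared quantities
    simp only [glyph, glyph_alt]
    rw [if_neg hs]
    set steps := PySem.Int.floordiv length divider with hsteps_def
    set M := steps * divider with hM
    have hsteps : 1 ≤ steps := by omega
    have hM1 : 1 ≤ M := by nlinarith [hsteps, hd]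
    -- A side: outer loop is a map
    rw [PySem.List.foldl_append_singleton_eq_map, List.nil_append]
    -- B side: the scan produces the prefix sums
    rw [foldl_scan]
    rw [runSums_pyRange _ 0 (M + 1) 0 le_rfl
      (by rw [PySem.List.pyRange_one_eq_nil le_rfl]; rfl), List.nil_append]
    simp only []
    apply List.map_congr_left
    intro s hsmem
    rw [PySem.List.mem_pyRange_one] at hsmem
    -- bounds for this bin
    have ha0 : 0 ≤ s * divider := mul_nonneg hsmem.1 (by omega)
    have hab : s * divider ≤ s * divider + divider + 1 := by omega
    have hbn : s * divider + divider + 1 ≤ M + 1 := by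
      have h1 : (s + 1) * divider ≤ steps * divider :=
        mul_le_mul_of_nonneg_right (by omega) (by omega)
      have h2 : (s + 1) * divider = s * divider + divider := by ring
      omega
    rw [slice_map_pyRange _ _ _ _ ha0 hab hbn]
    -- every epsilon the bin looks at carries the active count
    have hcnt : (PySem.List.pyRange (s * divider) (s * divider + divider + 1)).map
        (fun e => ((PySem.List.pyRange 0 (e + 1)).map (fun i =>
          ((diag.foldl (fun diff comp =>
            let lo := max comp.2.1 0
            let hi := min (comp.2.2 - 1) M
            if lo ≤ hi then
              (diff.insert lo (diff.getD lo 0 + 1)).insert (hi + 1)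
                ((diff.insert lo (diff.getD lo 0 + 1)).getD (hi + 1) 0 - 1)
            else diff) PySem.Dict.empty).getD i 0))).sum)
        = (PySem.List.pyRange (s * divider) (s * divider + divider + 1)).map (pvPI diag) := by
      apply List.map_congr_left
      intro e hemem
      rw [PySem.List.mem_pyRange_one] at hemem
      rw [diff_sum M e (by omega) (by omega) diag PySem.Dict.empty, pvPI_eq_countP]
      simp
    rw [hcnt]
    -- both sides: running max over the nonempty epsilon range
    rw [PySem.List.pyRange_one_cons (show s * divider < s * divider + divider + 1 by omega)]
    rw [List.foldl_cons, List.map_cons, PySem.List.max?_id_cons]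
    simp only [foldl_optmax, Option.getD_some]
    rw [List.foldl_map]
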